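-- pv_equiv track=rewrite | github.com/worldbridger-stack/clearbridge-skills | capabilities/engineering/api-integration/api-test-suite-builder/scripts/contract_validator.py | _paths_match
-- ===== SOURCE A (Python) =====
-- def _paths_match(spec_path: str, sample_path: str) -> bool:
--     """Check if a spec path (with {params}) matches a concrete sample path."""
--     spec_parts = spec_path.strip("/").split("/")
--     sample_parts = sample_path.strip("/").split("/")
--     if len(spec_parts) != len(sample_parts):
--         return False
--     for sp, sa in zip(spec_parts, sample_parts):
--         if sp.startswith("{") and sp.endswith("}"):
--             continue
--         if sp != sa:
--             return False
--     return True
-- ===== SOURCE B (Python) =====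
-- def _paths_match(spec_path: str, sample_path: str) -> bool:
--     """Recursive two-pointer matcher: walk both stripped paths segment by
--     segment via str.partition, never building the split lists."""
--     def go(sp, sa):
--         seg, sep1, sp_rest = sp.partition("/")
--         sseg, sep2, sa_rest = sa.partition("/")
--         if not (seg.startswith("{") and seg.endswith("}")) and seg != sseg:
--             return False
--         if not sep1 or not sep2:
--             return sep1 == sep2
--         return go(sp_rest, sa_rest)
--     return go(spec_path.strip("/"), sample_path.strip("/"))
-- ===== Notes on version B (the rewrite author's own statement) =====
-- stated objective: alternative
-- what changed: Replaces A's split-into-lists + length check + zipped scan with a recursive two-pointer walker that advances through both stripped strings segment by segment via str.partition, never materialising the split lists; the length check disappears into the simultaneous-end condition.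
import Mathlib
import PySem

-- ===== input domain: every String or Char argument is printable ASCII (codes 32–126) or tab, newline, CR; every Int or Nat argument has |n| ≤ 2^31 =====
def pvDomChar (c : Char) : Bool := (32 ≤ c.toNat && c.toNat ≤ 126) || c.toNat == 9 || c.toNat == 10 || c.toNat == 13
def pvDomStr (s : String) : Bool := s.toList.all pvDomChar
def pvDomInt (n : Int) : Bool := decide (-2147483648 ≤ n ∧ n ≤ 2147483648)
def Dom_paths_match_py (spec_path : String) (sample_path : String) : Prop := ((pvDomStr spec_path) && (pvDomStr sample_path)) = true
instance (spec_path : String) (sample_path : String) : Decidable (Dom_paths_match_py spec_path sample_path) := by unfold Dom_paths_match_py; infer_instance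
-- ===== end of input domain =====

-- B walks both stripped paths segment by segment with str.partition (a recursive
-- two-pointer matcher); A splits both into lists, compares lengths, then scans the zip.

-- ===== PORT A =====
def pvSegments (s : String) : List (List Char) :=
  PySem.Chars.splitOn (PySem.Chars.stripChars s.toList ['/']) ['/']

def pvIsParam (sp : List Char) : Bool :=
  PySem.Chars.startswith sp ['{'] && PySem.Chars.endswith sp ['}']

-- A's for-loop over zip(spec_parts, sample_parts) with `continue` / early `return False`
def pvPathsLoop : List (List Char × List Char) → Bool
  | [] => true
  | (sp, sa) :: rest =>
    if pvIsParam sp then pvPathsLoop rest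
    else if sp ≠ sa then false
    else pvPathsLoop rest

def paths_match_py (spec_path : String) (sample_path : String) : Bool :=
  let spec_parts := pvSegments spec_path
  let sample_parts := pvSegments sample_path
  if spec_parts.length ≠ sample_parts.length then false
  else pvPathsLoop (spec_parts.zip sample_parts)

-- ===== PORT B =====
-- s.partition("/") : (before, sep-present?, after); exact for the single-char separator
def pvPartSlash (l : List Char) : List Char × Bool × List Char :=
  match l.dropWhile (fun c => c ≠ '/') with
  | [] => (l.takeWhile (fun c => c ≠ '/'), false, [])
  | _ :: rest => (l.takeWhile (fun c => c ≠ '/'), true, rest)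

theorem pvPartSlash_rest_lt (l : List Char) (h : (pvPartSlash l).2.1 = true) :
    (pvPartSlash l).2.2.length < l.length := by
  unfold pvPartSlash at h ⊢
  cases hd : l.dropWhile (fun c => c ≠ '/') with
  | nil => rw [hd] at h; simp at h
  | cons a rest =>
    have hle := List.length_dropWhile_le (fun c => c ≠ '/') l
    rw [hd] at hle
    simp only [List.length_cons] at hle
    show rest.length < l.length
    omega

-- Source B's inner recursive go(sp, sa)
def pvGo (sp sa : List Char) : Bool :=
  let p1 := pvPartSlash sp
  let p2 := pvPartSlash sa
  if !(pvIsParam p1.1) && p1.1 ≠ p2.1 then false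
  else if !p1.2.1 || !p2.2.1 then p1.2.1 == p2.2.1
  else pvGo p1.2.2 p2.2.2
termination_by sp.length
decreasing_by
  rename_i h2
  refine pvPartSlash_rest_lt sp ?_
  cases hq : (pvPartSlash sp).2.1 with
  | true => rfl
  | false =>
    exact absurd (by rw [show (pvPartSlash sp).2.1 = false from hq]; rfl) (fun hh => h2 hh)

def paths_match_py_alt (spec_path : String) (sample_path : String) : Bool :=
  pvGo (PySem.Chars.stripChars spec_path.toList ['/'])
       (PySem.Chars.stripChars sample_path.toList ['/'])

-- ===== PRECONDITION & SPEC =====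
def Spec_paths_match_py (spec_path : String) (sample_path : String) (out : Bool) : Prop := out = paths_match_py_alt spec_path sample_path
instance (spec_path : String) (sample_path : String) (out : Bool) : Decidable (Spec_paths_match_py spec_path sample_path out) := by unfold Spec_paths_match_py; infer_instance

-- ===== CLAIM =====
def Claim_equal_paths_match_py : Prop := ∀ (spec_path : String) (sample_path : String), Dom_paths_match_py spec_path sample_path → Spec_paths_match_py spec_path sample_path (paths_match_py spec_path sample_path)

-- ===== LEMMAS AND PROOFS =====

-- structural characterisation of split("/") on a list of chars
def pvConsHead (pre : List Char) : List (List Char) → List (List Char)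
  | [] => [pre]
  | h :: t => (pre ++ h) :: t

def pvSplit : List Char → List (List Char)
  | [] => [[]]
  | c :: rest => if c = '/' then [] :: pvSplit rest else pvConsHead [c] (pvSplit rest)

theorem pvSplit_ne_nil (l : List Char) : pvSplit l ≠ [] := by
  cases l with
  | nil => simp [pvSplit]
  | cons c rest =>
    simp only [pvSplit]
    split
    · simp
    · cases h : pvSplit rest <;> simp [pvConsHead]

theorem pvConsHead_consHead (p q : List Char) (ls : List (List Char)) (h : ls ≠ []) :
    pvConsHead p (pvConsHead q ls) = pvConsHead (p ++ q) ls := by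
  cases ls with
  | nil => exact absurd rfl h
  | cons a t => simp [pvConsHead]

theorem pvSplitOn_go (fuel : Nat) (l cur : List Char) (acc : List (List Char))
    (h : l.length < fuel) :
    PySem.Chars.splitOn.go ['/'] fuel l cur acc
      = acc.reverse ++ pvConsHead cur.reverse (pvSplit l) := by
  induction fuel generalizing l cur acc with
  | zero => omega
  | succ n ih =>
    cases l with
    | nil => simp [PySem.Chars.splitOn.go, pvSplit, pvConsHead]
    | cons c rest =>
      by_cases hc : c = '/'
      · subst hc
        have hpre : List.isPrefixOf ['/'] ('/' :: rest) = true := by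
          simp [List.isPrefixOf]
        rw [PySem.Chars.splitOn.go]
        simp only [hpre, if_pos, List.length_singleton, List.drop_succ_cons, List.drop_zero]
        rw [ih rest [] (cur.reverse :: acc) (by simpa using Nat.lt_of_succ_lt_succ h)]
        have hne := pvSplit_ne_nil rest
        cases hr : pvSplit rest with
        | nil => exact absurd hr hne
        | cons a t => simp [pvSplit, pvConsHead, hr]
      · have hpre : List.isPrefixOf ['/'] (c :: rest) = false := by
          simp [List.isPrefixOf]; intro hco; exact absurd hco.symm hc
        rw [PySem.Chars.splitOn.go]
        simp only [hpre, Bool.false_eq_true, if_false]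
        rw [ih rest (c :: cur) acc (by simpa using Nat.lt_of_succ_lt_succ h)]
        have hne := pvSplit_ne_nil rest
        rw [show pvSplit (c :: rest) = pvConsHead [c] (pvSplit rest) by simp [pvSplit, hc]]
        rw [pvConsHead_consHead _ _ _ hne]
        simp

theorem pvSplitOn_eq (l : List Char) :
    PySem.Chars.splitOn l ['/'] = pvSplit l := by
  unfold PySem.Chars.splitOn
  rw [pvSplitOn_go (l.length + 1) l [] [] (by omega)]
  have hne := pvSplit_ne_nil l
  cases h : pvSplit l with
  | nil => exact absurd h hne
  | cons a t => simp [pvConsHead]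

-- pvSplit through the eyes of partition
theorem pvSplit_part (l : List Char) :
    pvSplit l = (if (pvPartSlash l).2.1 then (pvPartSlash l).1 :: pvSplit (pvPartSlash l).2.2
                 else [(pvPartSlash l).1]) := by
  induction l with
  | nil => decide
  | cons c rest ih =>
    by_cases hc : c = '/'
    · subst hc
      have : pvPartSlash ('/' :: rest) = ([], true, rest) := by
        simp [pvPartSlash, List.takeWhile, List.dropWhile]
      simp [pvSplit, this]
    · have hspan : pvPartSlash (c :: rest)
          = ((c :: (pvPartSlash rest).1, (pvPartSlash rest).2.1, (pvPartSlash rest).2.2)) := by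
        unfold pvPartSlash
        cases hd : rest.dropWhile (fun c : Char => !decide (c = '/')) <;>
          simp [hc, hd]
      rw [show pvSplit (c :: rest) = pvConsHead [c] (pvSplit rest) by simp [pvSplit, hc]]
      rw [hspan, ih]
      by_cases hb : (pvPartSlash rest).2.1 = true
      · simp [hb, pvConsHead]
      · simp only [Bool.not_eq_true] at hb; simp [hb, pvConsHead]

-- B's walker equals A's length-check + zipped scan, for any two char lists
theorem pvGo_eq (sp sa : List Char) :
    pvGo sp sa
      = (if (pvSplit sp).length ≠ (pvSplit sa).length then false
         else pvPathsLoop ((pvSplit sp).zip (pvSplit sa))) := by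
  induction hi : sp.length using Nat.strong_induction_on generalizing sp sa with
  | _ n ih =>
  subst hi
  rw [pvGo, pvSplit_part sp, pvSplit_part sa]
  by_cases h1 : (pvPartSlash sp).2.1 = true <;> by_cases h2 : (pvPartSlash sa).2.1 = true
  · -- both continue
    have hlt : (pvPartSlash sp).2.2.length < sp.length := pvPartSlash_rest_lt sp h1
    have ihr := ih (pvPartSlash sp).2.2.length hlt (pvPartSlash sp).2.2 (pvPartSlash sa).2.2 rfl
    simp only [h1, h2, if_true, Bool.not_true, Bool.or_self, Bool.false_eq_true, if_false]
    by_cases hp : (!pvIsParam (pvPartSlash sp).1 && decide ((pvPartSlash sp).1 ≠ (pvPartSlash sa).1)) = true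
    · rw [if_pos hp]
      have hp' : pvIsParam (pvPartSlash sp).1 = false ∧ (pvPartSlash sp).1 ≠ (pvPartSlash sa).1 := by
        simpa using hp
      obtain ⟨hnp', hne'⟩ := hp'
      by_cases hl : (pvSplit (pvPartSlash sp).2.2).length = (pvSplit (pvPartSlash sa).2.2).length
      · simp [hl, pvPathsLoop, hnp', hne']
      · simp [hl]
    · rw [if_neg hp]
      have hhead : pvIsParam (pvPartSlash sp).1 = true ∨ (pvPartSlash sp).1 = (pvPartSlash sa).1 := by
        by_cases hq : pvIsParam (pvPartSlash sp).1 = true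
        · exact Or.inl hq
        · right
          by_contra hne
          exact hp (by simp [hne, Bool.not_eq_true _ ▸ hq])
      rw [ihr]
      by_cases hl : (pvSplit (pvPartSlash sp).2.2).length = (pvSplit (pvPartSlash sa).2.2).length
      · rcases hhead with hq | hq <;> simp [hl, pvPathsLoop, hq]
      · simp [hl]
  · -- spec continues, sample ends
    have hne2 : (pvPartSlash sa).2.1 = false := by simpa using h2
    have hnn := pvSplit_ne_nil (pvPartSlash sp).2.2
    simp only [h1, hne2, if_true, Bool.false_eq_true, if_false]
    cases hq : pvSplit (pvPartSlash sp).2.2 with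
    | nil => exact absurd hq hnn
    | cons a t => simp
  · -- spec ends, sample continues
    have hne1 : (pvPartSlash sp).2.1 = false := by simpa using h1
    have hnn := pvSplit_ne_nil (pvPartSlash sa).2.2
    simp only [hne1, h2, if_true, Bool.false_eq_true, if_false]
    cases hq : pvSplit (pvPartSlash sa).2.2 with
    | nil => exact absurd hq hnn
    | cons a t => simp
  · -- both end
    have hne1 : (pvPartSlash sp).2.1 = false := by simpa using h1
    have hne2 : (pvPartSlash sa).2.1 = false := by simpa using h2
    simp only [hne1, hne2, Bool.false_eq_true, if_false]
    by_cases hp : pvIsParam (pvPartSlash sp).1 = true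
    · simp [hp, pvPathsLoop]
    · by_cases he : (pvPartSlash sp).1 = (pvPartSlash sa).1
      · simp [he, pvPathsLoop]
      · simp [hp, he, pvPathsLoop]

-- ===== VERDICT =====
theorem paths_match_py_spec : Claim_equal_paths_match_py := by
  intro spec_path sample_path _
  unfold Spec_paths_match_py paths_match_py paths_match_py_alt pvSegments
  rw [pvSplitOn_eq, pvSplitOn_eq, pvGo_eq]
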